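-- pv_equiv track=rewrite | github.com/pypi-data/pypi-mirror-320 | packages/xiaobaisaf/xiaobaisaf-3.2.17-py3-none-any.whl/saf/utils/android_position_to_code.py | get_min_bounds_index
-- ===== SOURCE A (Python) =====
-- def get_min_bounds_index(target: tuple = (0, 0), bounds_list: list = []) -> int:
--         """
--         查找包含目标点的最小边界的索引。
--         参数：
--             target (tuple): 目标点格式为 (x, y)。
--             bounds_list (list): 边界列表，格式为 [[x0, y0, x1, y1], ...]。
--         返回值：
--             int: 包含目标点的最小边界的索引。
--         """
--         min_area = float('inf')
--         min_index = 0
--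
--         for i, bounds in enumerate(bounds_list):
--             x0, y0, x1, y1 = bounds
--             if x0 < target[0] < x1 and y0 < target[1] < y1:
--                 area = (x1 - x0) * (y1 - y0)
--                 if area < min_area:
--                     min_area = area
--                     min_index = i
--         return min_index
-- ===== SOURCE B (Python) =====
-- def _area(bounds):
--     x0, y0, x1, y1 = bounds
--     return (x1 - x0) * (y1 - y0)
--
--
-- def get_min_bounds_index(target: tuple = (0, 0), bounds_list: list = []) -> int:
--     # Stable sort every (index, bounds) pair by area, then return the original
--     # index of the first bound (in that order) that strictly contains target.
--     ordered = sorted(enumerate(bounds_list), key=lambda p: _area(p[1]))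
--     for i, (x0, y0, x1, y1) in ordered:
--         if x0 < target[0] < x1 and y0 < target[1] < y1:
--             return i
--     return 0
-- ===== Notes on version B (the rewrite author's own statement) =====
-- stated objective: alternative
-- what changed: Replaces A's single-pass running-min (strict '<' on area with an inf sentinel) by pairing each bound with its index, stably sorting all pairs by area, and returning the index of the first containing bound in that order (0 if none); stability reproduces A's earliest-index tie-break.
import Mathlib
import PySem

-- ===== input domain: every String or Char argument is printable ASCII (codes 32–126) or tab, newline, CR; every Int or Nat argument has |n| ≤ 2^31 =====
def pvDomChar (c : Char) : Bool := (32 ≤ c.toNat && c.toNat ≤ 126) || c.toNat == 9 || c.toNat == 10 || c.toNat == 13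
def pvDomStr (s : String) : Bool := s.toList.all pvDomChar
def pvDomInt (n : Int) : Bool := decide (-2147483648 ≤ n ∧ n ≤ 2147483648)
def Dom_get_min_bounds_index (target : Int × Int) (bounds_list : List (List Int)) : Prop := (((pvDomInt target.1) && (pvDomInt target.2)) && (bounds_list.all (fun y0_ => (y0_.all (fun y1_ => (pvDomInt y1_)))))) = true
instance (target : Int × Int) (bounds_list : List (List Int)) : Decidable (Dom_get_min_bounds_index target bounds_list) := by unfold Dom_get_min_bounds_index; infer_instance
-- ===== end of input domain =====

-- B replaces A's running-min loop by a stable sort of (index, bounds) pairs by area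
-- followed by a first-containing scan (objective: alternative algorithm, same result).

-- ===== PORT A =====
-- 'x0, y0, x1, y1 = bounds' + 'x0 < target[0] < x1 and y0 < target[1] < y1' (raises ValueError unless len(bounds) == 4; excluded by Pre_)
def pvContains (t : Int × Int) (b : List Int) : Bool :=
  match b with
  | [x0, y0, x1, y1] => decide (x0 < t.1) && decide (t.1 < x1) && decide (y0 < t.2) && decide (t.2 < y1)
  | _ => false

-- '(x1 - x0) * (y1 - y0)' after the same 4-way unpacking
def pvArea (b : List Int) : Int :=
  match b with
  | [x0, y0, x1, y1] => (x1 - x0) * (y1 - y0)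
  | _ => 0

-- 'min_area = float("inf")' is modelled as 'none' (Option Int); 'area < min_area' is true when min_area is the infinity sentinel — exact for the Int areas of the loop.
def get_min_bounds_index (target : Int × Int) (bounds_list : List (List Int)) : Int :=
  ((PySem.List.enumerate bounds_list 0).foldl
    (fun (st : Option Int × Int) p =>
      if pvContains target p.2 then
        let area := pvArea p.2
        if (match st.1 with | none => true | some m => decide (area < m)) then (some area, p.1) else st
      else st)
    (none, 0)).2

-- ===== PORT B =====
def pvFirstContaining (t : Int × Int) : List (Int × List Int) → Int
  | [] => 0
  | p :: rest => if pvContains t p.2 then p.1 else pvFirstContaining t rest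

def get_min_bounds_index_alt (target : Int × Int) (bounds_list : List (List Int)) : Int :=
  pvFirstContaining target
    (PySem.List.sorted (PySem.List.enumerate bounds_list 0) (fun p => pvArea p.2) false)

-- ===== PRECONDITION & SPEC =====
-- Pre_ excludes exactly the inputs where Python A raises ValueError: a bounds entry whose length is not 4.
def Pre_get_min_bounds_index (target : Int × Int) (bounds_list : List (List Int)) : Prop :=
  ∀ b ∈ bounds_list, b.length = 4
instance (target : Int × Int) (bounds_list : List (List Int)) : Decidable (Pre_get_min_bounds_index target bounds_list) := by unfold Pre_get_min_bounds_index; infer_instance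
def pvWitness_get_min_bounds_index : (Int × Int) × List (List Int) := ((1, 1), [[0, 0, 2, 2]])

def Spec_get_min_bounds_index (target : Int × Int) (bounds_list : List (List Int)) (out : Int) : Prop := out = get_min_bounds_index_alt target bounds_list
instance (target : Int × Int) (bounds_list : List (List Int)) (out : Int) : Decidable (Spec_get_min_bounds_index target bounds_list out) := by unfold Spec_get_min_bounds_index; infer_instance

-- ===== CLAIM (what is proved, stated in full; the proofs are below) =====
def Claim_equal_get_min_bounds_index : Prop := ∀ (target : Int × Int) (bounds_list : List (List Int)), Dom_get_min_bounds_index target bounds_list → Pre_get_min_bounds_index target bounds_list → Spec_get_min_bounds_index target bounds_list (get_min_bounds_index target bounds_list)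

-- ===== LEMMAS AND PROOFS =====

def pvIns (x : Int × List Int) (acc : List (Int × List Int)) : List (Int × List Int) :=
  PySem.List.insertBy (fun a b => decide (pvArea a.2 < pvArea b.2)) x acc

-- the running state of A's loop agrees with the first containing element of the sorted accumulator
def pvRel (t : Int × Int) (o : Option (Int × List Int)) (st : Option Int × Int) : Prop :=
  match o with
  | none => st = (none, 0)
  | some m => st = (some (pvArea m.2), m.1)

lemma pv_ins_pairwise (x : Int × List Int) (acc : List (Int × List Int))
    (h : acc.Pairwise (fun a b => pvArea a.2 ≤ pvArea b.2)) :
    (pvIns x acc).Pairwise (fun a b => pvArea a.2 ≤ pvArea b.2) := by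
  induction acc with
  | nil => simp [pvIns, PySem.List.insertBy]
  | cons y ys ih =>
    rcases List.pairwise_cons.1 h with ⟨hy, hys⟩
    by_cases hlt : pvArea x.2 < pvArea y.2
    · have hins : pvIns x (y :: ys) = x :: y :: ys := by
        simp [pvIns, PySem.List.insertBy, hlt]
      rw [hins]
      refine List.pairwise_cons.2 ⟨?_, h⟩
      intro z hz
      rcases List.mem_cons.1 hz with hz | hz
      · subst hz; exact le_of_lt hlt
      · exact le_trans (le_of_lt hlt) (hy z hz)
    · have hins : pvIns x (y :: ys) = y :: pvIns x ys := by
        simp [pvIns, PySem.List.insertBy, hlt]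
      rw [hins]
      refine List.pairwise_cons.2 ⟨?_, ih hys⟩
      intro z hz
      have hz' : z = x ∨ z ∈ ys :=
        (PySem.List.mem_insertBy _ _ _ _).1 (by simpa [pvIns] using hz)
      rcases hz' with hz' | hz'
      · subst hz'; omega
      · exact hy z hz'

lemma pv_find_ins (t : Int × Int) (x : Int × List Int) (acc : List (Int × List Int))
    (h : acc.Pairwise (fun a b => pvArea a.2 ≤ pvArea b.2)) :
    List.find? (fun p => pvContains t p.2) (pvIns x acc) =
      match List.find? (fun p => pvContains t p.2) acc with
      | none => if pvContains t x.2 then some x else none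
      | some m => if pvContains t x.2 && decide (pvArea x.2 < pvArea m.2) then some x else some m := by
  induction acc with
  | nil => simp [pvIns, PySem.List.insertBy, List.find?]
  | cons y ys ih =>
    rcases List.pairwise_cons.1 h with ⟨hy, hys⟩
    by_cases hlt : pvArea x.2 < pvArea y.2
    · have hins : pvIns x (y :: ys) = x :: y :: ys := by
        simp [pvIns, PySem.List.insertBy, hlt]
      rw [hins]
      cases hfy : List.find? (fun p => pvContains t p.2) (y :: ys) with
      | none =>
        by_cases hcx : pvContains t x.2
        · rw [List.find?_cons_of_pos (by simpa using hcx)]; simp [hcx]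
        · rw [List.find?_cons_of_neg (by simpa using hcx), hfy]; simp [hcx]
      | some m =>
        have hm := List.mem_of_find?_eq_some hfy
        have hym : pvArea y.2 ≤ pvArea m.2 := by
          rcases List.mem_cons.1 hm with hm | hm
          · rw [hm]
          · exact hy m hm
        have hxm : pvArea x.2 < pvArea m.2 := lt_of_lt_of_le hlt hym
        by_cases hcx : pvContains t x.2
        · rw [List.find?_cons_of_pos (by simpa using hcx)]; simp [hcx, hxm]
        · rw [List.find?_cons_of_neg (by simpa using hcx), hfy]; simp [hcx]
    · have hins : pvIns x (y :: ys) = y :: pvIns x ys := by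
        simp [pvIns, PySem.List.insertBy, hlt]
      rw [hins]
      by_cases hcy : pvContains t y.2
      · rw [List.find?_cons_of_pos (by simpa using hcy),
          List.find?_cons_of_pos (by simpa using hcy)]
        simp [hlt]
      · rw [List.find?_cons_of_neg (by simpa using hcy),
          List.find?_cons_of_neg (by simpa using hcy)]
        exact ih hys

lemma pv_main (t : Int × Int) (l : List (Int × List Int)) :
    ∀ (acc : List (Int × List Int)) (st : Option Int × Int),
    acc.Pairwise (fun a b => pvArea a.2 ≤ pvArea b.2) →
    pvRel t (List.find? (fun p => pvContains t p.2) acc) st →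
    pvRel t (List.find? (fun p => pvContains t p.2)
        (l.foldl (fun acc x => pvIns x acc) acc))
      (l.foldl
        (fun (st : Option Int × Int) p =>
          if pvContains t p.2 then
            let area := pvArea p.2
            if (match st.1 with | none => true | some m => decide (area < m)) then (some area, p.1) else st
          else st)
        st) := by
  induction l with
  | nil => intro acc st h hr; simpa using hr
  | cons x xs ih =>
    intro acc st h hr
    simp only [List.foldl_cons]
    apply ih (pvIns x acc) _ (pv_ins_pairwise x acc h)
    rw [pv_find_ins t x acc h]
    cases hfa : List.find? (fun p => pvContains t p.2) acc with
    | none =>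
      rw [hfa] at hr
      simp only [pvRel] at hr
      subst hr
      by_cases hcx : pvContains t x.2
      · simp [pvRel, hcx]
      · simp [pvRel, hcx]
    | some m =>
      rw [hfa] at hr
      simp only [pvRel] at hr
      subst hr
      by_cases hcx : pvContains t x.2
      · by_cases hlt : pvArea x.2 < pvArea m.2
        · simp [pvRel, hcx, hlt]
        · simp [pvRel, hcx, hlt]
      · simp [pvRel, hcx]

lemma pv_firstContaining_eq_find (t : Int × Int) (l : List (Int × List Int)) :
    pvFirstContaining t l =
      match List.find? (fun p => pvContains t p.2) l with
      | none => 0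
      | some m => m.1 := by
  induction l with
  | nil => simp [pvFirstContaining]
  | cons p rest ih =>
    by_cases hc : pvContains t p.2
    · simp [pvFirstContaining, List.find?, hc]
    · have hc' : pvContains t p.2 = false := by simpa using hc
      simp only [pvFirstContaining, List.find?, hc', Bool.false_eq_true, if_false]
      exact ih

-- ===== VERDICT (by name: the statement is the Claim_ definition above) =====
theorem get_min_bounds_index_spec : Claim_equal_get_min_bounds_index := by
  intro target bounds_list _ _
  unfold Spec_get_min_bounds_index get_min_bounds_index get_min_bounds_index_alt
  rw [PySem.List.sorted_eq_foldl_insertBy]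
  have hmain := pv_main target (PySem.List.enumerate bounds_list 0) [] (none, 0)
    (by simp) (by simp [pvRel])
  rw [pv_firstContaining_eq_find]
  cases hf : List.find? (fun p => pvContains target p.2)
      ((PySem.List.enumerate bounds_list 0).foldl (fun acc x => pvIns x acc) []) with
  | none =>
    rw [hf] at hmain
    simp only [pvRel] at hmain
    simp only [pvIns] at hf
    rw [hf, hmain]
  | some m =>
    rw [hf] at hmain
    simp only [pvRel] at hmain
    simp only [pvIns] at hf
    rw [hf, hmain]
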